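-- pv_equiv track=rewrite | github.com/nedzof/ElectrumSVP | electrumsv/benford.py | _choose_benford_amount
-- ===== SOURCE A (Python) =====
-- from typing import Counter as CounterType, Dict, List, Optional, Sequence
--
-- def _smallest_amount_with_digit(digit: int, minimum_value: int) -> int:
--     if minimum_value <= digit:
--         return digit
--     exp = max(0, len(str(minimum_value)) - 1)
--     while True:
--         lower = digit * (10 ** exp)
--         upper = ((digit + 1) * (10 ** exp)) - 1 if digit < 9 else (10 ** (exp + 1)) - 1
--         if upper >= minimum_value:
--             return max(lower, minimum_value)
--         exp += 1
--
-- def _choose_benford_amount(digit: int, minimum_value: int, maximum_value: int) -> Optional[int]: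
--     if maximum_value < minimum_value:
--         return None
--     candidate = _smallest_amount_with_digit(digit, minimum_value)
--     if candidate > maximum_value:
--         return None
--
--     exp = len(str(maximum_value))
--     while exp >= 0:
--         base = 10 ** exp
--         lower = digit * base
--         upper = ((digit + 1) * base) - 1 if digit < 9 else (10 ** (exp + 1)) - 1
--         if upper < minimum_value:
--             exp -= 1
--             continue
--         candidate = min(maximum_value, upper)
--         if candidate >= max(minimum_value, lower):
--             return candidate
--         exp -= 1
--     return candidate
-- ===== SOURCE B (Python) =====
-- def _choose_benford_amount(digit, minimum_value, maximum_value):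
--     if maximum_value < minimum_value:
--         return None
--     if digit < 0 or digit > 9:
--         return None
--     if digit == 0:
--         return maximum_value if maximum_value >= 0 else None
--     if maximum_value <= 0:
--         return None
--     # largest power of ten not exceeding maximum_value
--     base = 1
--     while base * 10 <= maximum_value:
--         base *= 10
--     leading = maximum_value // base
--     if digit == leading:
--         candidate = maximum_value
--     elif digit < leading:
--         candidate = (digit + 1) * base - 1
--     elif base == 1:
--         return None
--     else:
--         candidate = (digit + 1) * (base // 10) - 1
--     return candidate if candidate >= minimum_value else None
-- ===== Notes on version B (the rewrite author's own statement) =====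
-- stated objective: simpler
-- what changed: B builds the answer directly from the magnitude and leading digit of maximum_value (three closed-form candidates, one power-of-ten loop) instead of A's smallest-amount helper search plus descending exponent band scan.
-- outside the precondition, e.g. on _choose_benford_amount(12, 0, 500): A returns 9, B returns None; on _choose_benford_amount(-1, -5, 100): A returns -1, B returns None
import Mathlib
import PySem

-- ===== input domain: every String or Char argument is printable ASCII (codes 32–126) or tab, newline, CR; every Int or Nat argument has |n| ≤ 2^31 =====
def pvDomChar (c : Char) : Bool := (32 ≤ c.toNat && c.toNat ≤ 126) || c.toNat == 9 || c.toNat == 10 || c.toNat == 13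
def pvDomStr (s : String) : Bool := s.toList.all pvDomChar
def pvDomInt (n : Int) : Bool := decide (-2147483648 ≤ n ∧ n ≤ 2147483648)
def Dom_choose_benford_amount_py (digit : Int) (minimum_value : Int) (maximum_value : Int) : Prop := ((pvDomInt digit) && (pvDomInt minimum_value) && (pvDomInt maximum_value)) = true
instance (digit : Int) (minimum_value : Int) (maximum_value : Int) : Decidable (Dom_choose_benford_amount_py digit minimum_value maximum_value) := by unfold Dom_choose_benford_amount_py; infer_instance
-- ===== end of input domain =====

-- B replaces A's helper search plus descending exponent band scan by a direct construction
-- from the magnitude and leading digit of maximum_value (objective: simpler).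

-- ===== PORT A =====
-- while-True loop of _smallest_amount_with_digit.  Fuel 64 is ample: on every input
-- admitted by Pre_ inside Dom the loop stops as soon as (digit+1)*10^exp - 1 ≥
-- minimum_value, which happens for some exp ≤ 11 since 10^11 > 2^31 ≥ minimum_value.
-- exp stays ≥ 0 along the loop, so Python's `10 ** exp` is exactly `10 ^ exp.toNat`.
def pvSawLoop (digit minimum_value : Int) : Nat → Int → Int
  | 0, _ => 0
  | fuel + 1, exp =>
    let lower := digit * 10 ^ exp.toNat
    let upper := if digit < 9 then (digit + 1) * 10 ^ exp.toNat - 1 else 10 ^ (exp + 1).toNat - 1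
    if minimum_value ≤ upper then max lower minimum_value
    else pvSawLoop digit minimum_value fuel (exp + 1)

def smallest_amount_with_digit (digit minimum_value : Int) : Int :=
  if minimum_value ≤ digit then digit
  else pvSawLoop digit minimum_value 64 (max 0 (PySem.Str.len (PySem.Int.toStr minimum_value) - 1))

-- `while exp >= 0` loop of _choose_benford_amount; fuel = exp + 1, exactly one unit
-- per iteration (fuel 0 ↔ exp = -1 ↔ loop exit returning the leftover candidate).
def pvBenfordLoop (digit minimum_value maximum_value : Int) : Nat → Int → Int → Option Int
  | 0, _, candidate => some candidate
  | fuel + 1, exp, candidate =>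
    let base := 10 ^ exp.toNat
    let lower := digit * base
    let upper := if digit < 9 then (digit + 1) * base - 1 else 10 ^ (exp + 1).toNat - 1
    if upper < minimum_value then pvBenfordLoop digit minimum_value maximum_value fuel (exp - 1) candidate
    else
      let candidate := min maximum_value upper
      if max minimum_value lower ≤ candidate then some candidate
      else pvBenfordLoop digit minimum_value maximum_value fuel (exp - 1) candidate

def choose_benford_amount_py (digit : Int) (minimum_value : Int) (maximum_value : Int) : Option Int :=
  if maximum_value < minimum_value then none
  else
    let candidate := smallest_amount_with_digit digit minimum_value
    if maximum_value < candidate then none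
    else
      let exp := PySem.Str.len (PySem.Int.toStr maximum_value)
      pvBenfordLoop digit minimum_value maximum_value (exp + 1).toNat exp candidate

-- ===== PORT B =====
-- `base = 1; while base * 10 <= maximum_value: base *= 10` — fuel 64 is ample
-- (within Dom the loop runs at most 10 times since 10^10 > 2^31 ≥ maximum_value).
def pvPow10Loop (maximum_value : Int) : Nat → Int → Int
  | 0, base => base
  | fuel + 1, base =>
    if base * 10 ≤ maximum_value then pvPow10Loop maximum_value fuel (base * 10) else base

def choose_benford_amount_py_alt (digit : Int) (minimum_value : Int) (maximum_value : Int) : Option Int :=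
  if maximum_value < minimum_value then none
  else if digit < 0 ∨ 9 < digit then none
  else if digit = 0 then (if 0 ≤ maximum_value then some maximum_value else none)
  else if maximum_value ≤ 0 then none
  else
    let base := pvPow10Loop maximum_value 64 1
    let leading := PySem.Int.floordiv maximum_value base
    let cand? : Option Int :=
      if digit = leading then some maximum_value
      else if digit < leading then some ((digit + 1) * base - 1)
      else if base = 1 then none
      else some ((digit + 1) * PySem.Int.floordiv base 10 - 1)
    match cand? with
    | none => none
    | some candidate => if minimum_value ≤ candidate then some candidate else none

-- ===== PRECONDITION & SPEC =====
-- Pre_ excludes digit values outside 0..9 except where A answers None before looking at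
-- the digit (empty range, or maximum_value < digit ≤ the minimum bound): a decimal leading
-- digit is 0..9 by nature; outside that, A's helper loop never terminates for most
-- digit < 0 inputs, and for digit > 9 A's band scan can never match and A returns
-- leftover loop state, so those inputs are outside the function's natural domain.
def Pre_choose_benford_amount_py (digit : Int) (minimum_value : Int) (maximum_value : Int) : Prop :=
  (0 ≤ digit ∧ digit ≤ 9) ∨ maximum_value < minimum_value ∨
    (minimum_value ≤ digit ∧ maximum_value < digit)
instance (digit : Int) (minimum_value : Int) (maximum_value : Int) : Decidable (Pre_choose_benford_amount_py digit minimum_value maximum_value) := by unfold Pre_choose_benford_amount_py; infer_instance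
def pvWitness_choose_benford_amount_py : Int × Int × Int := (3, 10, 5000)

def Spec_choose_benford_amount_py (digit : Int) (minimum_value : Int) (maximum_value : Int) (out : Option Int) : Prop := out = choose_benford_amount_py_alt digit minimum_value maximum_value
instance (digit : Int) (minimum_value : Int) (maximum_value : Int) (out : Option Int) : Decidable (Spec_choose_benford_amount_py digit minimum_value maximum_value out) := by unfold Spec_choose_benford_amount_py; infer_instance

-- ===== CLAIM (what is proved, stated in full; the proofs are below) =====
def Claim_equal_choose_benford_amount_py : Prop := ∀ (digit : Int) (minimum_value : Int) (maximum_value : Int), Dom_choose_benford_amount_py digit minimum_value maximum_value → Pre_choose_benford_amount_py digit minimum_value maximum_value → Spec_choose_benford_amount_py digit minimum_value maximum_value (choose_benford_amount_py digit minimum_value maximum_value)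

-- ===== LEMMAS AND PROOFS =====

-- A "band" is the set of integers whose decimal expansion starts with `digit` (at scale 10^e).
def pvInBand (d x : Int) (e : Nat) : Prop := d * 10 ^ e ≤ x ∧ x ≤ (d + 1) * 10 ^ e - 1

lemma pvPowPos (a : Nat) : (0:Int) < 10 ^ a := by positivity

lemma pvPowLe {a b : Nat} (h : a ≤ b) : (10:Int) ^ a ≤ 10 ^ b :=
  pow_le_pow_right₀ (by norm_num) h

-- exact length of str(m) for m ≥ 0
lemma pvToDigitsCore_len : ∀ (f n : Nat), n < f →
    (Nat.toDigitsCore 10 f n []).length = Nat.log 10 n + 1 := by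
  intro f
  induction f with
  | zero => intro n h; omega
  | succ f ih =>
    intro n h
    simp only [Nat.toDigitsCore]
    by_cases h10 : n / 10 = 0
    · rw [if_pos h10]
      have : n < 10 := by omega
      simp [Nat.log_of_lt this]
    · rw [if_neg h10]
      rw [Nat.toDigitsCore_lens_eq]
      have hn10 : 10 ≤ n := by omega
      rw [ih (n / 10) (by omega), Nat.log_of_one_lt_of_le (by norm_num) hn10]

lemma pvStrlen (m : Int) (h : 0 ≤ m) :
    PySem.Str.len (PySem.Int.toStr m) = ((Nat.log 10 m.toNat + 1 : Nat) : Int) := by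
  rw [PySem.Str.len_eq, PySem.Int.toList_toStr]
  unfold PySem.Int.toChars
  rw [if_neg (by omega)]
  unfold Nat.toDigits
  rw [pvToDigitsCore_len _ _ (by omega)]

lemma pvLogUpper (m : Int) (h : 0 ≤ m) : m < 10 ^ (Nat.log 10 m.toNat + 1) := by
  have hb := Nat.lt_pow_succ_log_self (b := 10) (by norm_num) m.toNat
  have hm : (m.toNat : Int) = m := Int.toNat_of_nonneg h
  calc m = (m.toNat : Int) := hm.symm
    _ < ((10 ^ (Nat.log 10 m.toNat + 1) : Nat) : Int) := by exact_mod_cast hb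
    _ = 10 ^ (Nat.log 10 m.toNat + 1) := by push_cast; ring

lemma pvLogLower (m : Int) (h : 1 ≤ m) : (10:Int) ^ Nat.log 10 m.toNat ≤ m := by
  have ha := Nat.pow_log_le_self 10 (show m.toNat ≠ 0 by omega)
  have hm : (m.toNat : Int) = m := Int.toNat_of_nonneg (by omega)
  calc (10:Int) ^ Nat.log 10 m.toNat = ((10 ^ Nat.log 10 m.toNat : Nat) : Int) := by push_cast; ring
    _ ≤ (m.toNat : Int) := by exact_mod_cast ha
    _ = m := hm

-- for 0 ≤ d ≤ 9 the two 'upper' formulas coincide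
lemma pvUpperEq (d exp : Int) (hd : d ≤ 9) (he : 0 ≤ exp) :
    (if d < 9 then (d + 1) * 10 ^ exp.toNat - 1 else (10:Int) ^ (exp + 1).toNat - 1)
      = (d + 1) * 10 ^ exp.toNat - 1 := by
  by_cases h : d < 9
  · rw [if_pos h]
  · rw [if_neg h]
    have hd9 : d = 9 := by omega
    have ht : (exp + 1).toNat = exp.toNat + 1 := by omega
    rw [ht, hd9, pow_succ]; ring

lemma pvSawLoop_spec (d mn : Int) (hd0 : 0 ≤ d) (hd9 : d ≤ 9) :
    ∀ (fuel : Nat) (e : Int), 0 ≤ e →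
      (∃ j : Nat, j < fuel ∧ mn ≤ (d + 1) * 10 ^ (e.toNat + j) - 1) →
      (∀ e' : Nat, e' < e.toNat → (d + 1) * 10 ^ e' - 1 < mn) →
      mn ≤ pvSawLoop d mn fuel e ∧
      (∃ e2 : Nat, pvInBand d (pvSawLoop d mn fuel e) e2) ∧
      ∀ (e2 : Nat) (x : Int), mn ≤ x → pvInBand d x e2 → pvSawLoop d mn fuel e ≤ x := by
  intro fuel
  induction fuel with
  | zero => rintro e he ⟨j, hj, -⟩ _; omega
  | succ fuel ih =>
    intro e he hex hlow
    simp only [pvSawLoop]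
    rw [pvUpperEq d e hd9 he]
    by_cases hstop : mn ≤ (d + 1) * 10 ^ e.toNat - 1
    · rw [if_pos hstop]
      have hp1 : (1:Int) ≤ 10 ^ e.toNat := pvPowPos e.toNat
      refine ⟨le_max_right _ _, ⟨e.toNat, le_max_left _ _, max_le (by nlinarith) hstop⟩, ?_⟩
      intro e2 x hx hb
      rcases lt_or_ge e2 e.toNat with hlt | hge
      · have := hlow e2 hlt
        have := hb.2
        omega
      · have hmono : d * 10 ^ e.toNat ≤ d * 10 ^ e2 :=
          mul_le_mul_of_nonneg_left (pvPowLe hge) hd0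
        exact max_le (hmono.trans hb.1) hx
    · rw [if_neg hstop]
      obtain ⟨j, hj, hjle⟩ := hex
      have hj0 : j ≠ 0 := by
        rintro rfl; simp at hjle; omega
      have he1 : (e + 1).toNat = e.toNat + 1 := by omega
      refine ih (e + 1) (by omega) ⟨j - 1, by omega, ?_⟩ ?_
      · have : (e + 1).toNat + (j - 1) = e.toNat + j := by omega
        rw [this]; exact hjle
      · intro e' he'
        rw [he1] at he'
        rcases lt_or_ge e' e.toNat with h1 | h1
        · exact hlow e' h1
        · have : e' = e.toNat := by omega
          rw [this]; omega

lemma pvC0_spec (d mn : Int) (hd0 : 0 ≤ d) (hd9 : d ≤ 9) (hdom : mn ≤ 2147483648) :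
    mn ≤ smallest_amount_with_digit d mn ∧
    (∃ e2 : Nat, pvInBand d (smallest_amount_with_digit d mn) e2) ∧
    ∀ (e2 : Nat) (x : Int), mn ≤ x → pvInBand d x e2 → smallest_amount_with_digit d mn ≤ x := by
  unfold smallest_amount_with_digit
  by_cases h : mn ≤ d
  · rw [if_pos h]
    refine ⟨h, ⟨0, by simp [pvInBand]⟩, ?_⟩
    rintro e2 x hx ⟨hxl, -⟩
    have hp1 : (1:Int) ≤ 10 ^ e2 := pvPowPos e2
    nlinarith
  · rw [if_neg h]
    have hmn1 : 1 ≤ mn := by omega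
    rw [pvStrlen mn (by omega)]
    have hmax : max 0 (((Nat.log 10 mn.toNat + 1 : Nat) : Int) - 1) = (Nat.log 10 mn.toNat : Int) := by
      push_cast; omega
    rw [hmax]
    have htn : ((Nat.log 10 mn.toNat : Int)).toNat = Nat.log 10 mn.toNat := by omega
    apply pvSawLoop_spec d mn hd0 hd9 64 _ (by omega)
    · refine ⟨11, by omega, ?_⟩
      rw [htn]
      have h10 : (10:Int) ^ 11 ≤ 10 ^ (Nat.log 10 mn.toNat + 11) := pvPowLe (by omega)
      have h11 : (2147483648:Int) + 1 ≤ 10 ^ 11 := by norm_num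
      nlinarith [pvPowPos (Nat.log 10 mn.toNat + 11)]
    · intro e' he'
      rw [htn] at he'
      have hlog := pvLogLower mn hmn1
      have hp : (10:Int) ^ (e' + 1) ≤ 10 ^ Nat.log 10 mn.toNat := pvPowLe (by omega)
      have hp2 : (d + 1) * 10 ^ e' ≤ 10 ^ (e' + 1) := by
        rw [pow_succ]; nlinarith [pvPowPos e']
      omega

lemma pvLoop_ret (d mn mx c : Int) (hd1 : 1 ≤ d) (hd9 : d ≤ 9) (ec : Nat)
    (hband : pvInBand d c ec) (hcmx : c ≤ mx) (hcmn : mn ≤ c)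
    (hmaximal : ∀ (e : Nat) (x : Int), pvInBand d x e → x ≤ mx → x ≤ c) :
    ∀ (k : Nat) (exp cand : Int), exp = (k : Int) - 1 → (ec : Int) ≤ exp →
      pvBenfordLoop d mn mx k exp cand = some c := by
  intro k
  induction k with
  | zero => intro exp cand h1 h2; exfalso; omega
  | succ k ih =>
    intro exp cand h1 h2
    have hexp0 : 0 ≤ exp := by omega
    simp only [pvBenfordLoop]
    rw [pvUpperEq d exp hd9 hexp0]
    have htec : ec ≤ exp.toNat := by omega
    rcases eq_or_lt_of_le htec with heq | hlt
    · have hLo : d * 10 ^ exp.toNat ≤ c := heq ▸ hband.1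
      have hU : c ≤ (d + 1) * 10 ^ exp.toNat - 1 := heq ▸ hband.2
      rw [if_neg (by omega)]
      have hmin : min mx ((d + 1) * 10 ^ exp.toNat - 1) = c := by
        apply le_antisymm
        · apply hmaximal exp.toNat _ ⟨le_min (hLo.trans hcmx) (hLo.trans hU), min_le_right _ _⟩
            (min_le_left _ _)
        · exact le_min hcmx hU
      rw [hmin, if_pos (max_le hcmn hLo)]
    · have hp1 : (1:Int) ≤ 10 ^ exp.toNat := pvPowPos exp.toNat
      have hlowgt : mx < d * 10 ^ exp.toNat := by
        by_contra hle
        push_neg at hle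
        have hb : pvInBand d (d * 10 ^ exp.toNat) exp.toNat := ⟨le_refl _, by nlinarith⟩
        have h1' := hmaximal exp.toNat _ hb hle
        have h2d : (d + 1) * 10 ^ ec ≤ d * 10 ^ (ec + 1) := by
          rw [pow_succ]; nlinarith [pvPowPos ec]
        have h3 : d * 10 ^ (ec + 1) ≤ d * 10 ^ exp.toNat :=
          mul_le_mul_of_nonneg_left (pvPowLe (by omega)) (by omega)
        have hcu := hband.2
        omega
      by_cases hskip : (d + 1) * 10 ^ exp.toNat - 1 < mn
      · rw [if_pos hskip]; exact ih (exp - 1) cand (by omega) (by omega)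
      · rw [if_neg hskip]
        have hfail : ¬ (max mn (d * 10 ^ exp.toNat) ≤ min mx ((d + 1) * 10 ^ exp.toNat - 1)) := by
          push_neg
          exact lt_of_le_of_lt (min_le_left _ _) (lt_of_lt_of_le hlowgt (le_max_right _ _))
        rw [if_neg hfail]
        exact ih (exp - 1) _ (by omega) (by omega)

lemma pvPow10_aux (mx : Int) :
    ∀ (fuel t : Nat), 10 ^ t ≤ mx → mx < 10 ^ (t + fuel) →
      ∃ u : Nat, pvPow10Loop mx fuel (10 ^ t) = 10 ^ u ∧ 10 ^ u ≤ mx ∧ mx < 10 ^ (u + 1) := by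
  intro fuel
  induction fuel with
  | zero => intro t h1 h2; exfalso; rw [Nat.add_zero] at h2; omega
  | succ fuel ih =>
    intro t h1 h2
    simp only [pvPow10Loop]
    by_cases h : (10:Int) ^ t * 10 ≤ mx
    · rw [if_pos h]
      have hps : (10:Int) ^ t * 10 = 10 ^ (t + 1) := (pow_succ 10 t).symm
      rw [hps]
      exact ih (t + 1) (hps ▸ h) (by have hr : t + 1 + fuel = t + (fuel + 1) := (by omega); rw [hr]; exact h2)
    · rw [if_neg h]
      push_neg at h
      exact ⟨t, rfl, h1, by rw [pow_succ]; linarith⟩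

lemma pvPow10_spec (mx : Int) (h1 : 1 ≤ mx) (hdom : mx ≤ 2147483648) :
    ∃ t : Nat, pvPow10Loop mx 64 1 = 10 ^ t ∧ 10 ^ t ≤ mx ∧ mx < 10 ^ (t + 1) := by
  have h2 : mx < 10 ^ (0 + 64 : Nat) := by
    have : (10:Int) ^ 11 ≤ 10 ^ (0 + 64 : Nat) := pvPowLe (by omega)
    have h11 : (2147483648:Int) < 10 ^ 11 := by norm_num
    omega
  have := pvPow10_aux mx 64 0 (by simpa using h1) h2
  simpa using this

-- A on the generic branch (1 ≤ digit, range nonempty, maximum ≥ 1), described through the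
-- largest band element c that is ≤ maximum_value.
lemma pvFinal (d mn mx c : Int) (hd1 : 1 ≤ d) (hd9 : d ≤ 9) (hmn : mn ≤ mx) (hmx1 : 1 ≤ mx)
    (hmdom : mn ≤ 2147483648)
    (ec : Nat) (hband : pvInBand d c ec) (hcmx : c ≤ mx)
    (hmaximal : ∀ (e : Nat) (x : Int), pvInBand d x e → x ≤ mx → x ≤ c) :
    choose_benford_amount_py d mn mx = if mn ≤ c then some c else none := by
  obtain ⟨hc0mn, ⟨e0b, hc0band⟩, hc0min⟩ := pvC0_spec d mn (by omega) hd9 hmdom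
  unfold choose_benford_amount_py
  rw [if_neg (by omega : ¬ mx < mn)]
  by_cases hmc : mn ≤ c
  · have hc0le : smallest_amount_with_digit d mn ≤ c := hc0min ec c hmc hband
    simp only []
    rw [if_neg (by omega : ¬ mx < smallest_amount_with_digit d mn)]
    rw [pvStrlen mx (by omega)]
    have hLb := pvLogUpper mx (by omega)
    set L := Nat.log 10 mx.toNat + 1 with hL
    have hecL : ec < L := by
      by_contra hcon
      push_neg at hcon
      have hp : (10:Int) ^ L ≤ 10 ^ ec := pvPowLe hcon
      have hp1 : (1:Int) ≤ 10 ^ ec := pvPowPos ec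
      have := hband.1
      nlinarith
    have hk : (((L : Nat) : Int) + 1).toNat = L + 1 := by omega
    rw [hk, if_pos hmc]
    exact pvLoop_ret d mn mx c hd1 hd9 ec hband hcmx hmc hmaximal (L + 1) (L : Int) _
      (by push_cast; ring) (by exact_mod_cast Int.ofNat_le.mpr (by omega))
  · have hnone : mx < smallest_amount_with_digit d mn := by
      by_contra hle
      push_neg at hle
      exact hmc (hc0mn.trans (hmaximal e0b _ hc0band hle))
    simp only []
    rw [if_pos hnone, if_neg hmc]

-- ===== VERDICT (by name: the statement is the Claim_ definition above) =====
set_option maxHeartbeats 1600000 in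
theorem choose_benford_amount_py_spec : Claim_equal_choose_benford_amount_py := by
  intro d mn mx hdom hpre
  unfold Spec_choose_benford_amount_py
  simp only [Dom_choose_benford_amount_py, pvDomInt, Bool.and_eq_true, decide_eq_true_eq] at hdom
  obtain ⟨⟨⟨hd1, hd2⟩, hm1, hm2⟩, hx1, hx2⟩ := hdom
  by_cases hlt : mx < mn
  · unfold choose_benford_amount_py choose_benford_amount_py_alt
    rw [if_pos hlt, if_pos hlt]
  · by_cases hd09' : 0 ≤ d ∧ d ≤ 9
    swap
    · have hmnd : mn ≤ d ∧ mx < d := by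
        rcases hpre with h | h | h
        · omega
        · omega
        · exact h
      unfold choose_benford_amount_py choose_benford_amount_py_alt smallest_amount_with_digit
      rw [if_neg hlt, if_neg hlt]
      simp only []
      rw [if_pos (by omega : d < 0 ∨ 9 < d), if_pos hmnd.1, if_pos hmnd.2]
    have hd09 : 0 ≤ d ∧ d ≤ 9 := hd09'
    have hmnmx : mn ≤ mx := by omega
    unfold choose_benford_amount_py_alt
    rw [if_neg hlt, if_neg (by omega : ¬ (d < 0 ∨ 9 < d))]
    by_cases hd0 : d = 0
    · rw [if_pos hd0]
      subst hd0
      obtain ⟨hc0mn, ⟨e0b, hc0band⟩, hc0min⟩ := pvC0_spec 0 mn (by omega) (by omega) (by omega)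
      by_cases hmx0 : 0 ≤ mx
      · rw [if_pos hmx0]
        have hxU := pvLogUpper mx hmx0
        have hc0le : smallest_amount_with_digit 0 mn ≤ mx := by
          apply hc0min (Nat.log 10 mx.toNat + 1) mx hmnmx
          constructor
          · simpa using hmx0
          · omega
        unfold choose_benford_amount_py
        rw [if_neg hlt]
        simp only []
        rw [if_neg (by omega : ¬ mx < smallest_amount_with_digit 0 mn)]
        rw [pvStrlen mx hmx0]
        set L := Nat.log 10 mx.toNat + 1 with hL
        have hk : (((L : Nat) : Int) + 1).toNat = L + 1 := by omega
        rw [hk]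
        simp only [pvBenfordLoop]
        rw [pvUpperEq 0 (L : Int) (by omega) (by omega)]
        have htn : ((L : Int)).toNat = L := by omega
        rw [htn]
        rw [if_neg (by omega : ¬ (0 + 1) * 10 ^ L - 1 < mn)]
        have hminx : min mx ((0 + 1) * 10 ^ L - 1) = mx := by omega
        rw [hminx, if_pos (by omega : max mn (0 * 10 ^ L) ≤ mx)]
      · rw [if_neg hmx0]
        unfold choose_benford_amount_py
        rw [if_neg hlt]
        simp only []
        have : mx < smallest_amount_with_digit 0 mn := by
          have := hc0band.1
          have hp1 : (1:Int) ≤ 10 ^ e0b := pvPowPos e0b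
          omega
        rw [if_pos this]
    · rw [if_neg hd0]
      have hd1' : 1 ≤ d := by omega
      by_cases hmx0 : mx ≤ 0
      · rw [if_pos hmx0]
        obtain ⟨hc0mn, ⟨e0b, hc0band⟩, hc0min⟩ := pvC0_spec d mn (by omega) (by omega) (by omega)
        unfold choose_benford_amount_py
        rw [if_neg hlt]
        simp only []
        have : mx < smallest_amount_with_digit d mn := by
          have := hc0band.1
          have hp1 : (1:Int) ≤ 10 ^ e0b := pvPowPos e0b
          nlinarith
        rw [if_pos this]
      · rw [if_neg hmx0]
        have hmx1 : 1 ≤ mx := by omega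
        obtain ⟨t, hbase, h10t, h10t1⟩ := pvPow10_spec mx hmx1 (by omega)
        simp only []
        rw [hbase]
        have hpt : (0:Int) < 10 ^ t := pvPowPos t
        have hFdef := (PySem.Int.floordiv_eq_iff_of_pos hpt (q := PySem.Int.floordiv mx (10 ^ t))).mp rfl
        set F := PySem.Int.floordiv mx (10 ^ t) with hF
        have hF1 : 1 ≤ F := (PySem.Int.le_floordiv_iff_mul_le hpt).mpr (by omega)
        have hF9 : F ≤ 9 := by
          have : F < 10 := (PySem.Int.floordiv_lt_iff_lt_mul hpt).mpr
            (by rw [mul_comm]; rw [pow_succ] at h10t1; omega)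
          omega
        by_cases hdF : d = F
        · rw [if_pos hdF]
          have heq := pvFinal d mn mx mx hd1' (by omega) hmnmx hmx1 (by omega) t
            ⟨by rw [hdF]; omega, by rw [hdF]; omega⟩ (le_refl mx)
            (fun e x _ hx => hx)
          rw [heq]
        · rw [if_neg hdF]
          by_cases hdlt : d < F
          · rw [if_pos hdlt]
            have hc : pvInBand d ((d + 1) * 10 ^ t - 1) t := ⟨by nlinarith, le_refl _⟩
            have hcmx : (d + 1) * 10 ^ t - 1 ≤ mx := by nlinarith
            have hmaximal : ∀ (e : Nat) (x : Int), pvInBand d x e → x ≤ mx →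
                x ≤ (d + 1) * 10 ^ t - 1 := by
              intro e x hb hx
              have het : e ≤ t := by
                by_contra hcon
                push_neg at hcon
                have hp : (10:Int) ^ (t + 1) ≤ 10 ^ e := pvPowLe (by omega)
                have hp1 : (1:Int) ≤ 10 ^ e := pvPowPos e
                have := hb.1
                nlinarith
              have : (d + 1) * 10 ^ e ≤ (d + 1) * 10 ^ t :=
                mul_le_mul_of_nonneg_left (pvPowLe het) (by omega)
              have := hb.2
              omega
            rw [pvFinal d mn mx _ hd1' (by omega) hmnmx hmx1 (by omega) t hc hcmx hmaximal]
          · rw [if_neg hdlt]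
            have hdgt : F < d := by omega
            rcases Nat.eq_zero_or_pos t with ht0 | ht1
            · subst ht0
              rw [if_pos (by norm_num)]
              obtain ⟨hc0mn, ⟨e0b, hc0band⟩, hc0min⟩ := pvC0_spec d mn (by omega) (by omega) (by omega)
              unfold choose_benford_amount_py
              rw [if_neg hlt]
              simp only []
              have hFx : F = mx := by simp at hFdef; omega
              have : mx < smallest_amount_with_digit d mn := by
                have h1 := hc0band.1
                have hp1 : (1:Int) ≤ 10 ^ e0b := pvPowPos e0b
                nlinarith
              rw [if_pos this]
            · rw [if_neg (by nlinarith [pvPowLe (show 1 ≤ t by omega)] : ¬ (10:Int) ^ t = 1)]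
              have hps : (10:Int) ^ t = 10 ^ (t - 1) * 10 := by
                rw [← pow_succ]; congr 1; omega
              have hdiv : PySem.Int.floordiv ((10:Int) ^ t) 10 = 10 ^ (t - 1) := by
                rw [PySem.Int.floordiv_eq_iff_of_pos (by norm_num)]
                constructor
                · omega
                · rw [mul_comm] at hps ⊢; nlinarith
              rw [hdiv]
              have hpt1 : (0:Int) < 10 ^ (t - 1) := pvPowPos (t - 1)
              have hc : pvInBand d ((d + 1) * 10 ^ (t - 1) - 1) (t - 1) := ⟨by nlinarith, le_refl _⟩
              have hcmx : (d + 1) * 10 ^ (t - 1) - 1 ≤ mx := by nlinarith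
              have hmaximal : ∀ (e : Nat) (x : Int), pvInBand d x e → x ≤ mx →
                  x ≤ (d + 1) * 10 ^ (t - 1) - 1 := by
                intro e x hb hx
                have het : e ≤ t := by
                  by_contra hcon
                  push_neg at hcon
                  have hp : (10:Int) ^ (t + 1) ≤ 10 ^ e := pvPowLe (by omega)
                  have hp1 : (1:Int) ≤ 10 ^ e := pvPowPos e
                  have := hb.1
                  nlinarith
                have hent : e ≠ t := by
                  rintro rfl
                  have := hb.1
                  nlinarith
                have het1 : e ≤ t - 1 := by omega
                have : (d + 1) * 10 ^ e ≤ (d + 1) * 10 ^ (t - 1) :=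
                  mul_le_mul_of_nonneg_left (pvPowLe het1) (by omega)
                have := hb.2
                omega
              rw [pvFinal d mn mx _ hd1' (by omega) hmnmx hmx1 (by omega) (t - 1) hc hcmx hmaximal]
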